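-- pv_equiv track=rewrite | github.com/gkanellopoulos/mnemefusion | tests/benchmarks/nearmiss_analysis.py | is_near_miss
-- ===== SOURCE A (Python) =====
-- def parse_dialog_id(did):
--     """'D3:19' -> (3, 19). Returns (None, None) on failure."""
--     try:
--         parts = did.split(":")
--         if len(parts) >= 2 and parts[0].startswith("D"):
--             return int(parts[0][1:]), int(parts[1])
--     except Exception:
--         pass
--     return None, None
--
-- def same_session(did1, did2):
--     s1, _ = parse_dialog_id(did1)
--     s2, _ = parse_dialog_id(did2)
--     return s1 is not None and s1 == s2
--
-- def is_near_miss(evidence_ids, retrieved_ids, k=10):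
--     """True if all evidence IDs miss top-k but at least one shares session with a retrieved ID."""
--     ev_set = set(evidence_ids)
--     top_k = set(retrieved_ids[:k])
--     if ev_set & top_k:
--         return False  # it's actually a hit
--     for eid in evidence_ids:
--         for rid in retrieved_ids[:k]:
--             if same_session(eid, rid):
--                 return True
--     return False
-- ===== SOURCE B (Python) =====
-- def _session(did):
--     """Session number of a dialog ID, or None if it does not fully parse."""
--     parts = did.split(":")
--     if len(parts) < 2 or not parts[0].startswith("D"):
--         return None
--     try:
--         int(parts[1])  # index must parse too, else the ID is malformed
--         return int(parts[0][1:])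
--     except ValueError:
--         return None
--
-- def is_near_miss(evidence_ids, retrieved_ids, k=10):
--     """True if all evidence IDs miss top-k but at least one shares session with a retrieved ID."""
--     top = retrieved_ids[:k]
--     if set(evidence_ids) & set(top):
--         return False  # it's actually a hit
--     ev_sessions = {s for s in map(_session, evidence_ids) if s is not None}
--     top_sessions = {s for s in map(_session, top) if s is not None}
--     return bool(ev_sessions & top_sessions)
-- ===== Notes on version B (the rewrite author's own statement) =====
-- stated objective: simpler
-- what changed: Replaces the nested per-pair same_session loop (which re-parses both IDs for every pair) with two one-pass session-set builds and a single symmetric set intersection; each ID is parsed once.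
import Mathlib
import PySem

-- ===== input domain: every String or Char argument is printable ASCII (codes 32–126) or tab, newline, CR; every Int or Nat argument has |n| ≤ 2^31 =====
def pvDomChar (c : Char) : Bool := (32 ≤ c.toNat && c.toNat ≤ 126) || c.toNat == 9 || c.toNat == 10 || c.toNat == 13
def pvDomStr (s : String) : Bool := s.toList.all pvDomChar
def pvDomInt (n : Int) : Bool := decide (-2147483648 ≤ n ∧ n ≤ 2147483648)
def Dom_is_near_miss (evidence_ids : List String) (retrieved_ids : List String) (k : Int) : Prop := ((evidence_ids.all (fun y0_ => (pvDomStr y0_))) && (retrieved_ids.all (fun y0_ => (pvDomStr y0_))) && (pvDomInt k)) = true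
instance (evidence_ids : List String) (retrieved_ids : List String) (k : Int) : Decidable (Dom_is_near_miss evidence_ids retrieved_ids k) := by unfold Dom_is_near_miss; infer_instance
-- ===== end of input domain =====

-- B replaces A's nested per-pair same_session loop by two one-pass session-set builds
-- and one set intersection (each ID parsed once); objective: simpler.

-- ===== PORT A =====
def parse_dialog_id (did : String) : Option Int × Option Int :=
  let parts := (PySem.Str.split? did ":").getD []
  if 2 ≤ parts.length ∧ PySem.Str.startswith (parts.headD "") "D" = true then
    -- try: int(parts[0][1:]), int(parts[1]); any ValueError → (None, None)
    match PySem.Int.ofStr? (PySem.Str.slice (parts.headD "") (some 1) none),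
          PySem.Int.ofStr? ((parts[1]?).getD "") with
    | some a, some b => (some a, some b)
    | _, _ => (none, none)
  else (none, none)

def same_session (did1 : String) (did2 : String) : Bool :=
  let s1 := (parse_dialog_id did1).1
  let s2 := (parse_dialog_id did2).1
  s1.isSome && (s1 == s2)

def is_near_miss (evidence_ids : List String) (retrieved_ids : List String) (k : Int) : Bool :=
  let ev_set := PySem.Set.ofList evidence_ids
  let top_k := PySem.Set.ofList (PySem.List.slice retrieved_ids none (some k))
  if !(PySem.Set.inter ev_set top_k).isEmpty then false
  else
    evidence_ids.any (fun eid =>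
      (PySem.List.slice retrieved_ids none (some k)).any (fun rid => same_session eid rid))

-- ===== PORT B =====
def pv_session (did : String) : Option Int :=
  let parts := (PySem.Str.split? did ":").getD []
  if parts.length < 2 ∨ ¬ PySem.Str.startswith (parts.headD "") "D" = true then none
  else
    match PySem.Int.ofStr? ((parts[1]?).getD "") with
    | none => none
    | some _ => PySem.Int.ofStr? (PySem.Str.slice (parts.headD "") (some 1) none)

def is_near_miss_alt (evidence_ids : List String) (retrieved_ids : List String) (k : Int) : Bool :=
  let top := PySem.List.slice retrieved_ids none (some k)
  if !(PySem.Set.inter (PySem.Set.ofList evidence_ids) (PySem.Set.ofList top)).isEmpty then false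
  else
    let ev_sessions : PySem.Set Int := PySem.Set.ofList ((evidence_ids.map pv_session).filterMap id)
    let top_sessions : PySem.Set Int := PySem.Set.ofList ((top.map pv_session).filterMap id)
    !(PySem.Set.inter ev_sessions top_sessions).isEmpty

-- ===== PRECONDITION & SPEC =====
def Spec_is_near_miss (evidence_ids : List String) (retrieved_ids : List String) (k : Int) (out : Bool) : Prop := out = is_near_miss_alt evidence_ids retrieved_ids k
instance (evidence_ids : List String) (retrieved_ids : List String) (k : Int) (out : Bool) : Decidable (Spec_is_near_miss evidence_ids retrieved_ids k out) := by unfold Spec_is_near_miss; infer_instance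

-- ===== CLAIM (what is proved, stated in full; the proofs are below) =====
def Claim_equal_is_near_miss : Prop := ∀ (evidence_ids : List String) (retrieved_ids : List String) (k : Int), Dom_is_near_miss evidence_ids retrieved_ids k → Spec_is_near_miss evidence_ids retrieved_ids k (is_near_miss evidence_ids retrieved_ids k)

-- ===== LEMMAS AND PROOFS =====

theorem pv_session_eq_fst (did : String) : pv_session did = (parse_dialog_id did).1 := by
  simp only [pv_session, parse_dialog_id]
  split_ifs with hB hA hA
  · rcases hB with h | h
    · exact absurd hA.1 (by omega)
    · exact absurd hA.2 h
  · rfl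
  · cases PySem.Int.ofStr? ((((PySem.Str.split? did ":").getD [])[1]?).getD "") <;>
      cases PySem.Int.ofStr? (PySem.Str.slice (((PySem.Str.split? did ":").getD []).headD "") (some 1) none) <;> rfl
  · push Not at hB
    exact absurd ⟨by omega, hB.2⟩ hA

theorem opt_session_lem (o1 o2 : Option Int) :
    (o1.isSome && (o1 == o2)) = true ↔ ∃ s, o1 = some s ∧ o2 = some s := by
  cases o1 <;> cases o2 <;>
    simp only [Option.isSome_some, Option.isSome_none, Bool.false_and, Bool.true_and,
      beq_iff_eq, Option.some.injEq, reduceCtorEq, Bool.false_eq_true, and_false,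
      exists_const, false_and, exists_eq_left'] <;>
    first | simp | exact eq_comm

theorem same_session_iff (d1 d2 : String) :
    same_session d1 d2 = true ↔ ∃ s, pv_session d1 = some s ∧ pv_session d2 = some s := by
  rw [pv_session_eq_fst, pv_session_eq_fst]
  simp only [same_session]
  exact opt_session_lem _ _

-- ===== VERDICT (by name: the statement is the Claim_ definition above) =====
theorem is_near_miss_spec : Claim_equal_is_near_miss := by
  intro ev re k _
  unfold Spec_is_near_miss is_near_miss is_near_miss_alt
  set top := PySem.List.slice re none (some k) with htop
  by_cases hg : !(PySem.Set.inter (PySem.Set.ofList ev) (PySem.Set.ofList top)).isEmpty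
  · simp [hg]
  · simp only [hg, Bool.not_eq_true] at *
    simp only [Bool.false_eq_true, if_false]
    have hne : ∀ (l : List Int), (!l.isEmpty) = true ↔ ∃ x, x ∈ l := by
      intro l; cases l <;> simp
    rw [Bool.eq_iff_iff, hne]
    simp only [List.any_eq_true, same_session_iff, PySem.Set.mem_inter, PySem.Set.mem_ofList,
      List.mem_filterMap, List.mem_map, id]
    constructor
    · rintro ⟨e, he, r, hr, s, hes, hrs⟩
      exact ⟨s, ⟨pv_session e, ⟨e, he, rfl⟩, hes⟩, ⟨pv_session r, ⟨r, hr, rfl⟩, hrs⟩⟩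
    · rintro ⟨x, ⟨a, ⟨e, he, hea⟩, hax⟩, ⟨b, ⟨r, hr, hrb⟩, hbx⟩⟩
      exact ⟨e, he, r, hr, x, hea ▸ hax, hrb ▸ hbx⟩
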